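-- pv_equiv track=rewrite | github.com/AswinSTushar/Python | greedy.py | minMaxCandy
-- ===== SOURCE A (Python) =====
-- def minMaxCandy(prices, k):
--     # code here
--     prices.sort()
--     n=len(prices)
--     #min cost
--     min_cost=0
--     i=0
--     j=n-1
--     while i<=j:
--         min_cost+=prices[i]
--         i+=1
--         j-=k
--     #max cost
--     max_cost=0
--     i=n-1
--     j=0
--     while j<=i:
--         max_cost+=prices[i]
--         i-=1
--         j+=k
--     return [min_cost,max_cost]
-- ===== SOURCE B (Python) =====
-- def minMaxCandy(prices, k):
--     prices.sort()
--     n = len(prices)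
--     m = (n - 1) // (k + 1) + 1 if n else 0
--     return [sum(prices[:m]), sum(prices[n - m:])]
-- ===== Notes on version B (the rewrite author's own statement) =====
-- stated objective: simpler
-- what changed: Replaces A's two two-pointer while-loops by a closed-form count of paid items m = (n-1)//(k+1)+1 and two slice sums over the sorted list.
-- outside the precondition, e.g. on minMaxCandy([5, 2], -1): A raises IndexError, B raises ZeroDivisionError; on minMaxCandy([5, 2, 7], -3): A raises IndexError, B returns [0, 0]
import Mathlib
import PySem

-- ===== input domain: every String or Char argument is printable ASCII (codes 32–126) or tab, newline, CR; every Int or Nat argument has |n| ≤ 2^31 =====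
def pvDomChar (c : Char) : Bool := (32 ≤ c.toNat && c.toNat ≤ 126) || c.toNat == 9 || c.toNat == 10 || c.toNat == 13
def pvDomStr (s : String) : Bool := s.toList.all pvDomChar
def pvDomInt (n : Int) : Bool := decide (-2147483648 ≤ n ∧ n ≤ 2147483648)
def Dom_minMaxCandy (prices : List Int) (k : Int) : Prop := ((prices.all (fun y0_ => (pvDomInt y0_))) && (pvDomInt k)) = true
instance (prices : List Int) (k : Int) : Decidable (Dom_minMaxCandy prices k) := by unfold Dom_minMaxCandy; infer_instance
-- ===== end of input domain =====

-- B replaces A's two two-pointer while-loops by a closed-form count of paid items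
-- m = (n-1)//(k+1)+1 and two slice sums (simpler decomposition, same O(n log n) cost).
-- Both A and B sort `prices` in place; the equivalence proved is about the return value.


-- ===== PORT A =====
-- while i<=j: min_cost += prices[i]; i += 1; j -= k
-- fuel-bounded: inside Pre_ (k ≥ 0) the loop makes at most `s.length` steps, and
-- every access prices[i] is in range (0 ≤ i ≤ j ≤ n-1), so `(pyGet? …).getD 0` is exact.
def pvMinLoop (s : List Int) (k : Int) : Nat → Int → Int → Int → Int
  | 0, _, _, acc => acc
  | fuel+1, i, j, acc =>
    if i ≤ j then pvMinLoop s k fuel (i+1) (j-k) (acc + (PySem.List.pyGet? s i).getD 0)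
    else acc

-- while j<=i: max_cost += prices[i]; i -= 1; j += k
def pvMaxLoop (s : List Int) (k : Int) : Nat → Int → Int → Int → Int
  | 0, _, _, acc => acc
  | fuel+1, i, j, acc =>
    if j ≤ i then pvMaxLoop s k fuel (i-1) (j+k) (acc + (PySem.List.pyGet? s i).getD 0)
    else acc

def minMaxCandy (prices : List Int) (k : Int) : List Int :=
  let s := PySem.List.sorted prices (fun x => x) false   -- prices.sort()
  let n : Int := s.length
  let min_cost := pvMinLoop s k s.length 0 (n-1) 0
  let max_cost := pvMaxLoop s k s.length (n-1) 0 0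
  [min_cost, max_cost]

-- ===== PORT B =====
def minMaxCandy_alt (prices : List Int) (k : Int) : List Int :=
  let s := PySem.List.sorted prices (fun x => x) false   -- prices.sort()
  let n : Int := s.length
  let m : Int := if n ≠ 0 then PySem.Int.floordiv (n-1) (k+1) + 1 else 0
  [(PySem.List.slice s none (some m)).sum, (PySem.List.slice s (some (n - m)) none).sum]

-- ===== PRECONDITION & SPEC =====
-- On k < 0 with nonempty prices, A's while-loops run off the end of the list and raise
-- IndexError (and B raises ZeroDivisionError at k = -1); those inputs are excluded.
-- With empty prices A returns [0,0] for every k, so the empty list stays inside Pre_.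
def Pre_minMaxCandy (prices : List Int) (k : Int) : Prop := 0 ≤ k ∨ prices = []
instance (prices : List Int) (k : Int) : Decidable (Pre_minMaxCandy prices k) := by unfold Pre_minMaxCandy; infer_instance

def pvWitness_minMaxCandy : List Int × Int := ([3, 1, 2, 5, 4], 2)

def Spec_minMaxCandy (prices : List Int) (k : Int) (out : List Int) : Prop := out = minMaxCandy_alt prices k
instance (prices : List Int) (k : Int) (out : List Int) : Decidable (Spec_minMaxCandy prices k out) := by unfold Spec_minMaxCandy; infer_instance

-- ===== CLAIM (what is proved, stated in full; the proofs are below) =====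
def Claim_equal_minMaxCandy : Prop := ∀ (prices : List Int) (k : Int), Dom_minMaxCandy prices k → Pre_minMaxCandy prices k → Spec_minMaxCandy prices k (minMaxCandy prices k)

-- ===== LEMMAS AND PROOFS =====

-- number of iterations a two-pointer loop still makes from pointers i ≤ j with gap shrink k+1
def pvTc (k i j : Int) : Nat := if i ≤ j then (j - i).toNat / (k+1).toNat + 1 else 0

theorem pvTc_step (k i j : Int) (hk : 0 ≤ k) (hij : i ≤ j) :
    pvTc k (i+1) (j-k) = pvTc k i j - 1 := by
  unfold pvTc
  rw [if_pos hij]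
  by_cases h : i + 1 ≤ j - k
  · rw [if_pos h]
    have hb : (k+1).toNat ≤ (j-i).toNat := by omega
    have hb0 : 0 < (k+1).toNat := by omega
    have he : (j - k - (i+1)).toNat = (j-i).toNat - (k+1).toNat := by omega
    rw [he, Nat.div_eq_sub_div hb0 hb]
    exact (Nat.succ_sub_one _).symm
  · rw [if_neg h]
    have : (j - i).toNat < (k+1).toNat := by omega
    have hz : (j - i).toNat / (k+1).toNat = 0 := Nat.div_eq_of_lt this
    omega

theorem pvTc_shift (k a b a' b' : Int) (h : b - a = b' - a') : pvTc k a b = pvTc k a' b' := by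
  unfold pvTc
  rcases (by omega : a ≤ b ∨ b < a) with hab | hab
  · rw [if_pos hab, if_pos (by omega)]
    congr 2
    omega
  · rw [if_neg (by omega), if_neg (by omega)]

theorem pvMinLoop_eq (fuel : Nat) : ∀ (s : List Int) (k i j acc : Int),
    0 ≤ k → 0 ≤ i → j ≤ (s.length : Int) - 1 → pvTc k i j ≤ fuel →
    pvMinLoop s k fuel i j acc = acc + ((s.drop i.toNat).take (pvTc k i j)).sum := by
  induction fuel with
  | zero =>
    intro s k i j acc hk hi hj hf
    have : pvTc k i j = 0 := by omega
    simp [pvMinLoop, this]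
  | succ fuel ih =>
    intro s k i j acc hk hi hj hf
    by_cases hij : i ≤ j
    · have hil : i.toNat < s.length := by omega
      have hget : (PySem.List.pyGet? s i).getD 0 = s[i.toNat] := by
        obtain ⟨m, hm⟩ : ∃ m : Nat, i = (m : Int) := ⟨i.toNat, by omega⟩
        subst hm
        rw [PySem.List.pyGet?_natCast]
        have hm' : m < s.length := by simpa using hil
        simp [List.getElem?_eq_getElem hm']
      have htc : pvTc k i j = (j-i).toNat / (k+1).toNat + 1 := by simp [pvTc, hij]
      have hrec := pvTc_step k i j hk hij
      rw [pvMinLoop, if_pos hij, ih s k (i+1) (j-k) _ hk (by omega) (by omega) (by omega)]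
      have hdrop : s.drop i.toNat = s[i.toNat] :: s.drop (i.toNat + 1) :=
        List.drop_eq_getElem_cons hil
      have hi1 : (i+1).toNat = i.toNat + 1 := by omega
      rw [hget, hi1, hrec, htc, hdrop]
      simp only [Nat.add_sub_cancel, List.take_succ_cons, List.sum_cons]
      ring
    · have : pvTc k i j = 0 := by simp [pvTc, hij]
      simp [pvMinLoop, hij, this]

theorem pvMaxLoop_eq (fuel : Nat) : ∀ (s : List Int) (k i j acc : Int),
    0 ≤ k → 0 ≤ j → i ≤ (s.length : Int) - 1 → pvTc k j i ≤ fuel →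
    pvMaxLoop s k fuel i j acc
      = acc + ((s.reverse.drop (s.length - 1 - i.toNat)).take (pvTc k j i)).sum := by
  induction fuel with
  | zero =>
    intro s k i j acc hk hj hi hf
    have : pvTc k j i = 0 := by omega
    simp [pvMaxLoop, this]
  | succ fuel ih =>
    intro s k i j acc hk hj hi hf
    by_cases hij : j ≤ i
    · have hil : i.toNat < s.length := by omega
      have hget : (PySem.List.pyGet? s i).getD 0 = s[i.toNat] := by
        obtain ⟨m, hm⟩ : ∃ m : Nat, i = (m : Int) := ⟨i.toNat, by omega⟩
        subst hm
        rw [PySem.List.pyGet?_natCast]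
        have hm' : m < s.length := by simpa using hil
        simp [List.getElem?_eq_getElem hm']
      have htc : pvTc k j i = (i-j).toNat / (k+1).toNat + 1 := by simp [pvTc, hij]
      have hrec : pvTc k (j+k) (i-1) = pvTc k j i - 1 := by
        rw [pvTc_shift k (j+k) (i-1) (j+1) (i-k) (by ring)]
        exact pvTc_step k j i hk hij
      rw [pvMaxLoop, if_pos hij, ih s k (i-1) (j+k) _ hk (by omega) (by omega) (by omega)]
      have hridx : s.length - 1 - i.toNat < s.reverse.length := by simp; omega
      have hrget : s.reverse[s.length - 1 - i.toNat]'(by simpa using hridx) = s[i.toNat] := by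
        rw [List.getElem_reverse]
        congr 1
        omega
      have hdrop : s.reverse.drop (s.length - 1 - i.toNat)
          = s[i.toNat] :: s.reverse.drop (s.length - 1 - i.toNat + 1) := by
        rw [List.drop_eq_getElem_cons hridx, hrget]
      rw [hget, hrec, htc, hdrop]
      simp only [Nat.add_sub_cancel, List.take_succ_cons, List.sum_cons]
      by_cases h2 : (i-j).toNat / (k+1).toNat = 0
      · simp [h2]
      · have h1 : 1 ≤ i := by
          by_contra h
          have hi0 : i - 1 < j + k := by omega
          rw [htc] at hrec
          simp [pvTc, not_le.mpr hi0] at hrec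
          omega
        have hidx : s.length - 1 - (i-1).toNat = s.length - 1 - i.toNat + 1 := by omega
        rw [hidx]
        ring
    · have : pvTc k j i = 0 := by simp [pvTc, hij]
      simp [pvMaxLoop, hij, this]

theorem pvRevTakeSum (s : List Int) (t : Nat) :
    (s.reverse.take t).sum = (s.drop (s.length - t)).sum := by
  rw [List.take_reverse]
  exact List.sum_reverse _

-- ===== VERDICT (by name: the statement is the Claim_ definition above) =====
theorem minMaxCandy_spec : Claim_equal_minMaxCandy := by
  intro prices k hdom hpre
  unfold Spec_minMaxCandy minMaxCandy minMaxCandy_alt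
  set s := PySem.List.sorted prices (fun x => x) false with hs
  rcases Nat.eq_zero_or_pos s.length with hn | hn
  · -- empty list: both loops make no step, both slices are empty
    have hse : s = [] := List.eq_nil_of_length_eq_zero hn
    simp [hse, pvMinLoop, pvMaxLoop, PySem.List.slice]
  · -- nonempty list, and then Pre_ forces 0 ≤ k
    have hk : 0 ≤ k := by
      rcases hpre with hk | hnil
      · exact hk
      · exfalso
        have : s.length = 0 := by rw [hs, hnil]; simp [PySem.List.length_sorted]
        omega
    have hlen : (1:Int) ≤ (s.length : Int) := by exact_mod_cast hn
    -- the common iteration count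
    have htc : pvTc k 0 ((s.length:Int) - 1) = (s.length - 1) / (k+1).toNat + 1 := by
      have h0 : (0:Int) ≤ (s.length:Int) - 1 := by omega
      simp only [pvTc, if_pos h0]
      congr 2
      omega
    have hfuel : pvTc k 0 ((s.length:Int) - 1) ≤ s.length := by
      rw [htc]
      have := Nat.div_le_self (s.length - 1) (k+1).toNat
      omega
    -- B's m equals the count
    have hm : (if (s.length:Int) ≠ 0 then PySem.Int.floordiv ((s.length:Int)-1) (k+1) + 1 else 0)
        = ((s.length - 1) / (k+1).toNat + 1 : Nat) := by
      have hne : (s.length:Int) ≠ 0 := by omega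
      rw [if_pos hne]
      have h1 : ((s.length:Int) - 1) = ((s.length - 1 : Nat) : Int) := by omega
      have h2 : (k + 1) = (((k+1).toNat : Nat) : Int) := by omega
      conv_lhs => rw [h1, h2, PySem.Int.floordiv_natCast]
      push_cast
      ring
    set t : Nat := (s.length - 1) / (k+1).toNat + 1 with ht
    have htlen : t ≤ s.length := by
      have := Nat.div_le_self (s.length - 1) (k+1).toNat
      omega
    have hmin := pvMinLoop_eq s.length s k 0 ((s.length:Int)-1) 0 hk le_rfl (by omega) hfuel
    have hmax := pvMaxLoop_eq s.length s k ((s.length:Int)-1) 0 0 hk le_rfl (by omega) hfuel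
    simp only [hmin, hmax, htc, hm]
    have hslice1 : PySem.List.slice s none (some ((t:Nat):Int)) = s.take t :=
      PySem.List.slice_to_natCast s t
    have hslice2 : PySem.List.slice s (some ((s.length:Int) - (t:Int))) none = s.drop (s.length - t) := by
      have : ((s.length:Int) - (t:Int)) = ((s.length - t : Nat) : Int) := by omega
      rw [this, PySem.List.slice_from_natCast]
    have hi0 : ((0:Int)).toNat = 0 := rfl
    have hidx : ((s.length:Int) - 1).toNat = s.length - 1 := by omega
    rw [hslice1, hslice2]
    have hdropidx : s.length - 1 - ((s.length:Int)-1).toNat = 0 := by omega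
    rw [hdropidx, hi0, List.drop_zero, List.drop_zero]
    rw [pvRevTakeSum]
    simp
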